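-- pv_equiv track=rewrite | github.com/SUTURO/suturo_nlp | activate_language_processing/scripts/enhanced_tests.py | compare_entities
-- ===== SOURCE A (Python) =====
-- def compare_entities(ground_truth, transcription):
--     if len(ground_truth) != len(transcription):
--         return False
--
--     def _normalize(items):
--         entities = []
--         for item in items:
--             entities.append(
--                 (item.get("role", ""), item.get("value", ""), item.get("entity", ""))
--             )
--         return sorted(entities)
--
--     return _normalize(ground_truth) == _normalize(transcription)
-- ===== SOURCE B (Python) =====
-- def compare_entities(ground_truth, transcription):
--     if len(ground_truth) != len(transcription):
--         return False
--
--     counts = {}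
--     for item in ground_truth:
--         key = (item.get("role", ""), item.get("value", ""), item.get("entity", ""))
--         counts[key] = counts.get(key, 0) + 1
--
--     for item in transcription:
--         key = (item.get("role", ""), item.get("value", ""), item.get("entity", ""))
--         c = counts.get(key, 0)
--         if c == 0:
--             return False
--         counts[key] = c - 1
--
--     return True
-- ===== Notes on version B (the rewrite author's own statement) =====
-- stated objective: alternative
-- what changed: Replaces build-two-lists/sort-both/compare with a single hash-count pass: count ground-truth tuples in a dict, then decrement per transcription tuple with an early False on a missing/exhausted tuple.
import Mathlib
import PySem

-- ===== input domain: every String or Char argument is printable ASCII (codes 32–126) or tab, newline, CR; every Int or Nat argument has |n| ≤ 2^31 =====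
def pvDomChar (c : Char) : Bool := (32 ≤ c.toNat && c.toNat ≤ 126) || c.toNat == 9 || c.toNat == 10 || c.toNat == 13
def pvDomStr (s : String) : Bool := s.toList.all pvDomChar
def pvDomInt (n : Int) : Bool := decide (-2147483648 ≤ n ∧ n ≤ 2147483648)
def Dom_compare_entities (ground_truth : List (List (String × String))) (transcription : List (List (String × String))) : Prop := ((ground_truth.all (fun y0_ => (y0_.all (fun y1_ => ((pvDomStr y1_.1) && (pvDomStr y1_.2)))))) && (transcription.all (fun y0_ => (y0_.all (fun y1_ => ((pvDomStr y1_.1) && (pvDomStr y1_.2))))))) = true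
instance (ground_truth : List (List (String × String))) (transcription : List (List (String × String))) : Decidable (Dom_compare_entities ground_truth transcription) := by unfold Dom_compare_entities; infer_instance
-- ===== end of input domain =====

-- B replaces A's build-sort-compare with one counting pass over a dict and a decrementing
-- pass with an early False; equivalence of the two Bool results is proved on all inputs.

-- (item.get("role",""), item.get("value",""), item.get("entity","")) — shared by both Pythons verbatim
def entKey (item : List (String × String)) : String × String × String :=
  ((PySem.Dict.mk item).getD "role" "", (PySem.Dict.mk item).getD "value" "", (PySem.Dict.mk item).getD "entity" "")

-- ===== PORT A =====
-- Python sorts the triples by lexicographic tuple comparison; 'toLex' on nested pairs of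
-- Strings is exactly that order, so 'sorted' with this key is Python's sorted(entities).
def lexKey (t : String × String × String) : String ×ₗ (String ×ₗ String) :=
  toLex (t.1, toLex t.2)

def compare_entities (ground_truth : List (List (String × String))) (transcription : List (List (String × String))) : Bool :=
  if ground_truth.length != transcription.length then false
  else
    let normalize := fun (items : List (List (String × String))) =>
      PySem.List.sorted (items.foldl (fun entities item => entities ++ [entKey item]) []) lexKey false
    normalize ground_truth == normalize transcription

-- ===== PORT B =====
def compare_entities_alt (ground_truth : List (List (String × String))) (transcription : List (List (String × String))) : Bool :=
  if ground_truth.length != transcription.length then false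
  else
    let counts := ground_truth.foldl
      (fun d item => let k := entKey item; d.insert k (d.getD k 0 + 1))
      (PySem.Dict.empty (κ := String × String × String) (ν := Int))
    -- the early 'return False' is modelled by a 'none' state that the rest of the fold preserves
    match transcription.foldl
      (fun st item => match st with
        | none => none
        | some d =>
          let k := entKey item
          let c := d.getD k 0
          if c == 0 then none else some (d.insert k (c - 1)))
      (some counts) with
    | none => false
    | some _ => true

-- ===== PRECONDITION & SPEC =====
def Spec_compare_entities (ground_truth : List (List (String × String))) (transcription : List (List (String × String))) (out : Bool) : Prop := out = compare_entities_alt ground_truth transcription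
instance (ground_truth : List (List (String × String))) (transcription : List (List (String × String))) (out : Bool) : Decidable (Spec_compare_entities ground_truth transcription out) := by unfold Spec_compare_entities; infer_instance

-- ===== CLAIM (what is proved, stated in full; the proofs are below) =====
def Claim_equal_compare_entities : Prop := ∀ (ground_truth : List (List (String × String))) (transcription : List (List (String × String))), Dom_compare_entities ground_truth transcription → Spec_compare_entities ground_truth transcription (compare_entities ground_truth transcription)

-- ===== LEMMAS AND PROOFS =====

theorem lexKey_injective : Function.Injective lexKey := by
  intro ⟨a, b, c⟩ ⟨d, e, f⟩ h
  simpa [lexKey, Prod.ext_iff] using h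

-- A's sorted-lists comparison decides permutation equivalence of the two triple lists
theorem sorted_lex_eq_iff_perm (xs ys : List (String × String × String)) :
    (PySem.List.sorted xs lexKey false = PySem.List.sorted ys lexKey false) ↔ xs.Perm ys := by
  constructor
  · intro h
    exact ((PySem.List.sorted_perm xs lexKey false).symm.trans
      (h ▸ PySem.List.sorted_perm ys lexKey false))
  · intro hp
    exact PySem.List.sorted_eq_sorted_of_perm xs ys lexKey lexKey_injective hp

-- B's consuming fold, abstracted to a fold over the keys themselves
def consumeStep (st : Option (PySem.Dict (String × String × String) Int))
    (k : String × String × String) : Option (PySem.Dict (String × String × String) Int) :=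
  match st with
  | none => none
  | some d =>
    let c := d.getD k 0
    if c == 0 then none else some (d.insert k (c - 1))

theorem consume_none (bs : List (String × String × String)) :
    bs.foldl consumeStep none = none := by
  induction bs with
  | nil => rfl
  | cons b bs ih => simpa [consumeStep] using ih

theorem consume_isSome_iff (bs : List (String × String × String))
    (d : PySem.Dict (String × String × String) Int)
    (hnn : ∀ k, 0 ≤ d.getD k 0) :
    (bs.foldl consumeStep (some d)).isSome = true ↔
      ∀ k, (bs.count k : Int) ≤ d.getD k 0 := by
  induction bs generalizing d with
  | nil => simpa using hnn
  | cons b bs ih =>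
    by_cases hb : d.getD b 0 = 0
    · simp only [List.foldl_cons, consumeStep, hb]
      simp only [beq_self_eq_true, if_true, consume_none]
      constructor
      · intro h; cases h
      · intro h
        have := h b
        simp [hb] at this
        omega
    · have hpos : 1 ≤ d.getD b 0 := by have := hnn b; omega
      simp only [List.foldl_cons, consumeStep]
      rw [if_neg (by simpa using hb)]
      have hnn' : ∀ k, 0 ≤ (d.insert b (d.getD b 0 - 1)).getD k 0 := by
        intro k
        rw [PySem.Dict.getD_insert]
        split_ifs with hk
        · omega
        · exact hnn k
      rw [ih _ hnn']
      constructor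
      · intro h k
        have := h k
        rw [PySem.Dict.getD_insert] at this
        by_cases hk : k = b
        · subst hk; simp at this ⊢; omega
        · simp only [List.count_cons, beq_iff_eq, if_neg hk, if_neg (Ne.symm hk),
            add_zero] at this ⊢
          exact this
      · intro h k
        have := h k
        rw [PySem.Dict.getD_insert]
        by_cases hk : k = b
        · subst hk; simp at this ⊢; omega
        · simp only [List.count_cons, beq_iff_eq, if_neg hk, if_neg (Ne.symm hk),
            add_zero] at this ⊢
          exact this

-- the counting pass builds exactly the multiset of ground-truth keys
theorem counts_getD (as : List (String × String × String)) (k : String × String × String) :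
    (as.foldl (fun d x => d.insert x (d.getD x 0 + 1))
      (PySem.Dict.empty (κ := String × String × String) (ν := Int))).getD k 0 = (as.count k : Int) := by
  rw [PySem.Dict.getD_foldl_insert_add_one]
  simp

theorem count_inst_eq (k : String × String × String) (l : List (String × String × String)) :
    @List.count _ instBEqProd k l = @List.count _ instBEqOfDecidableEq k l := by
  induction l with
  | nil => rfl
  | cons b t ih => simp [List.count_cons, ih]

theorem subperm_of_counts {α : Type} [DecidableEq α] (bs as : List α)
    (hlen : as.length = bs.length)
    (h : ∀ k, bs.count k ≤ as.count k) : bs.Perm as := by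
  have hsub : bs.Subperm as := List.subperm_ext_iff.mpr (fun x _ => h x)
  exact hsub.perm_of_length_le (le_of_eq hlen)

-- ===== VERDICT (by name: the statement is the Claim_ definition above) =====
theorem compare_entities_spec : Claim_equal_compare_entities := by
  intro gt tr _
  unfold Spec_compare_entities compare_entities compare_entities_alt
  by_cases hlen : gt.length = tr.length
  · simp only [hlen, bne_self_eq_false, Bool.false_eq_true, if_false]
    rw [PySem.List.foldl_append_singleton_eq_map, PySem.List.foldl_append_singleton_eq_map]
    simp only [List.nil_append]
    -- rewrite both folds over items as folds over the mapped key lists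
    have hA : ∀ (u v : List (List (String × String))),
        (u.foldl (fun d item => let k := entKey item; d.insert k (d.getD k 0 + 1))
          (PySem.Dict.empty (κ := String × String × String) (ν := Int)))
        = ((u.map entKey).foldl (fun d x => d.insert x (d.getD x 0 + 1))
          (PySem.Dict.empty (κ := String × String × String) (ν := Int))) ∧
        (v.foldl (fun st item => consumeStep st (entKey item)) = (fun st => (v.map entKey).foldl consumeStep st)) := by
      intro u v
      constructor
      · rw [List.foldl_map]
      · funext st; rw [List.foldl_map]
    obtain ⟨hbuild, hcons⟩ := hA gt tr
    rw [hbuild]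
    have hstep : (fun st item => match st with
        | none => none
        | some d =>
          let k := entKey item
          let c := d.getD k 0
          if c == 0 then none else some (d.insert k (c - 1)))
        = (fun st item => consumeStep st (entKey item)) := by
      funext st item; cases st <;> rfl
    rw [hstep, congrFun hcons (some _)]
    set as := gt.map entKey with has
    set bs := tr.map entKey with hbs
    have hlen' : as.length = bs.length := by simp [has, hbs, hlen]
    have hnn : ∀ k, 0 ≤ (as.foldl (fun d x => d.insert x (d.getD x 0 + 1))
        (PySem.Dict.empty (κ := String × String × String) (ν := Int))).getD k 0 := by
      intro k; rw [counts_getD]; positivity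
    have hiff := consume_isSome_iff bs _ hnn
    simp only [counts_getD] at hiff
    have hperm_iff : (∀ k, (bs.count k : Int) ≤ (as.count k : Int)) ↔ as.Perm bs := by
      constructor
      · intro h
        refine (subperm_of_counts bs as hlen' (fun k => ?_)).symm
        rw [← count_inst_eq, ← count_inst_eq]
        exact_mod_cast h k
      · intro h k
        exact_mod_cast le_of_eq (h.symm.count_eq k)
  -- (Perm.count_eq uses the ambient BEq instance on triples)
    rcases hfold : bs.foldl consumeStep (some _) with _ | d
    · have : ¬ as.Perm bs := by
        intro hp
        have : (bs.foldl consumeStep (some _)).isSome = true := hiff.mpr (hperm_iff.mpr hp)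
        rw [hfold] at this; cases this
      have : ¬ PySem.List.sorted as lexKey false = PySem.List.sorted bs lexKey false := by
        rw [sorted_lex_eq_iff_perm]; exact this
      simpa using this
    · have hp : as.Perm bs := hperm_iff.mp (hiff.mp (by rw [hfold]; rfl))
      have : PySem.List.sorted as lexKey false = PySem.List.sorted bs lexKey false :=
        (sorted_lex_eq_iff_perm as bs).mpr hp
      simpa using this
  · simp [hlen]
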